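-- pv_equiv track=rewrite | github.com/Happy-ryan/PS | 백준/Silver/2607. 비슷한 단어/비슷한 단어.py | isPeudoAnagram
-- ===== SOURCE A (Python) =====
-- from collections import Counter
--
-- def isPeudoAnagram(s1, s2):
--     flag = False
--     dic = Counter()
--
--     for x1 in s1:
--         dic[x1] += 1
--
--     for x2 in s2:
--         dic[x2] -= 1
--         if dic[x2] == 0:
--             dic.pop(x2) # 0을 삭제하므로 애너그램의 경우 빈 리스트만 남는다.
--
--     if list(dic.values()) in [[-1], [1], [], [-1, 1], [1, -1]]:
--         flag = True
--
--     return flag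
-- ===== SOURCE B (Python) =====
-- def isPeudoAnagram(s1, s2):
--     pos = 0
--     neg = 0
--     for ch in dict.fromkeys(s1 + s2):
--         d = s1.count(ch) - s2.count(ch)
--         pos += max(0, d)
--         neg += max(0, -d)
--     return pos <= 1 and neg <= 1
-- ===== Notes on version B (the rewrite author's own statement) =====
-- stated objective: simpler
-- what changed: Instead of building a pruned Counter-difference dict and testing its value list against five hard-coded literal lists, B keeps two scalar accumulators (total positive and negative count excess over the distinct characters) and returns pos <= 1 and neg <= 1.
import Mathlib
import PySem

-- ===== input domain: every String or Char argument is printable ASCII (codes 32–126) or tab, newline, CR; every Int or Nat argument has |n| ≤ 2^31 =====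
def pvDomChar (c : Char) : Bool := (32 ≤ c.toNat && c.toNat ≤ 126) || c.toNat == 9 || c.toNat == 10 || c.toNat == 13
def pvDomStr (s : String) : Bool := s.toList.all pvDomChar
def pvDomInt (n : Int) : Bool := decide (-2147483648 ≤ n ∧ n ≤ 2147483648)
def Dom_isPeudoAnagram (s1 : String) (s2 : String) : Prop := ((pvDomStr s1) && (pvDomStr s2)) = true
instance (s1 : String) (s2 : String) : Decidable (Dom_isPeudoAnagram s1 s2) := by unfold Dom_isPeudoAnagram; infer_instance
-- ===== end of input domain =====

-- B replaces A's pruned Counter-difference dict (value list tested against five hard-coded lists)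
-- by two scalar accumulators (positive/negative count excess) over the distinct characters; objective: simpler.


-- ===== PORT A =====
def isPeudoAnagram (s1 : String) (s2 : String) : Bool :=
  let flag := false
  let dic : PySem.Dict Char Int := PySem.Dict.empty
  -- for x1 in s1: dic[x1] += 1
  let dic := s1.toList.foldl (fun d x1 => d.modify x1 0 (· + 1)) dic
  -- for x2 in s2: dic[x2] -= 1; if dic[x2] == 0: dic.pop(x2)
  let dic := s2.toList.foldl (fun d x2 =>
      let d := d.modify x2 0 (· - 1)
      if d.getD x2 0 == 0 then d.erase x2 else d) dic
  -- if list(dic.values()) in [[-1], [1], [], [-1, 1], [1, -1]]: flag = True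
  let flag := if ([[(-1 : Int)], [1], [], [-1, 1], [1, -1]] : List (List Int)).contains dic.values then true else flag
  flag

-- ===== PORT B =====
def isPeudoAnagram_alt (s1 : String) (s2 : String) : Bool :=
  let l1 := s1.toList
  let l2 := s2.toList
  -- for ch in dict.fromkeys(s1 + s2): d = s1.count(ch) - s2.count(ch); pos += max(0, d); neg += max(0, -d)
  let pn := (PySem.Set.ofList (l1 ++ l2)).foldl
      (fun (pn : Int × Int) ch =>
        let d := (l1.count ch : Int) - (l2.count ch : Int)
        (pn.1 + max 0 d, pn.2 + max 0 (-d))) ((0 : Int), (0 : Int))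
  -- return pos <= 1 and neg <= 1
  pn.1 ≤ 1 && pn.2 ≤ 1

-- ===== PRECONDITION & SPEC =====
def Spec_isPeudoAnagram (s1 : String) (s2 : String) (out : Bool) : Prop := out = isPeudoAnagram_alt s1 s2
instance (s1 : String) (s2 : String) (out : Bool) : Decidable (Spec_isPeudoAnagram s1 s2 out) := by unfold Spec_isPeudoAnagram; infer_instance

-- ===== CLAIM (what is proved, stated in full; the proofs are below) =====
def Claim_equal_isPeudoAnagram : Prop := ∀ (s1 : String) (s2 : String), Dom_isPeudoAnagram s1 s2 → Spec_isPeudoAnagram s1 s2 (isPeudoAnagram s1 s2)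

-- ===== LEMMAS AND PROOFS =====

theorem pvGet?_erase {κ ν : Type} [BEq κ] [LawfulBEq κ] [DecidableEq κ] (d : PySem.Dict κ ν) (k c : κ) :
    (d.erase k).get? c = if c = k then none else d.get? c := by
  simp only [PySem.Dict.get?, PySem.Dict.erase, List.find?_filter]
  split
  · subst c
    rw [List.find?_eq_none.mpr]
    · rfl
    · intro p hp; simp
  · rename_i h
    have he : (fun (a : κ × ν) => decide ((!a.1 == k) = true ∧ (a.1 == c) = true))
        = (fun (a : κ × ν) => a.1 == c) := by
      funext a
      by_cases ha : a.1 = c <;> simp [ha, h]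
    rw [he]

def pvOpt (v : Int) : Option Int := if v = 0 then none else some v

theorem pvOpt_of_ne {v : Int} (h : v ≠ 0) : pvOpt v = some v := if_neg h

def pvInv (d : PySem.Dict Char Int) (f : Char → Int) : Prop :=
  ∀ c, d.get? c = pvOpt (f c)

theorem pvGetD_of_inv {d : PySem.Dict Char Int} {f : Char → Int} (h : pvInv d f) (c : Char) :
    d.getD c 0 = f c := by
  rw [PySem.Dict.getD_eq_get?_getD, h c, pvOpt]
  split <;> simp_all

theorem pvInc_loop (l : List Char) (d : PySem.Dict Char Int) (f : Char → Int)
    (hI : pvInv d f) (hpos : ∀ c, 0 ≤ f c) :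
    pvInv (l.foldl (fun d x => d.modify x 0 (· + 1)) d) (fun c => f c + l.count c) := by
  induction l generalizing d f with
  | nil => simpa using hI
  | cons x t ih =>
    simp only [List.foldl_cons]
    have hstep : pvInv (d.modify x 0 (· + 1)) (fun c => f c + if c = x then 1 else 0) := by
      intro c
      show (d.modify x 0 (· + 1)).get? c = pvOpt (f c + if c = x then 1 else 0)
      simp only [PySem.Dict.modify, PySem.Dict.get?_insert, pvGetD_of_inv hI]
      by_cases hc : c = x
      · have h0 := hpos x
        rw [if_pos hc, if_pos hc, hc, pvOpt_of_ne (by omega)]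
      · rw [if_neg hc, if_neg hc, hI c, add_zero]
    have hrec := ih (d.modify x 0 (· + 1)) _ hstep
      (by intro c; have h1 := hpos c; have h2 := hpos x
          by_cases hc : c = x <;> simp [hc] <;> omega)
    have hfun : (fun c => (f c + if c = x then 1 else 0) + (t.count c : Int))
        = (fun c => f c + ((x :: t).count c : Int)) := by
      funext c
      by_cases hc : c = x
      · subst hc
        simp [List.count_cons]
        push_cast
        ring
      · simp [List.count_cons, hc, Ne.symm hc]
    rw [hfun] at hrec
    exact hrec

theorem pvDec_loop (l : List Char) (d : PySem.Dict Char Int) (f : Char → Int) (hI : pvInv d f) :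
    pvInv (l.foldl (fun d x =>
        let d := d.modify x 0 (· - 1)
        if d.getD x 0 == 0 then d.erase x else d) d)
      (fun c => f c - l.count c) := by
  induction l generalizing d f with
  | nil => simpa using hI
  | cons x t ih =>
    simp only [List.foldl_cons]
    have hgm : ∀ c, (d.modify x 0 (· - 1)).get? c
        = if c = x then some (f x - 1) else d.get? c := by
      intro c
      simp only [PySem.Dict.modify, PySem.Dict.get?_insert, pvGetD_of_inv hI]
    have hgD : (d.modify x 0 (· - 1)).getD x 0 = f x - 1 := by
      rw [PySem.Dict.getD_eq_get?_getD, hgm x]; simp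
    have hstep : pvInv (if (d.modify x 0 (· - 1)).getD x 0 == 0
          then (d.modify x 0 (· - 1)).erase x else d.modify x 0 (· - 1))
        (fun c => f c - if c = x then 1 else 0) := by
      intro c
      show _ = pvOpt (f c - if c = x then 1 else 0)
      rw [hgD]
      by_cases hz : f x - 1 = 0
      · rw [if_pos (by simpa using hz), pvGet?_erase]
        by_cases hc : c = x
        · rw [if_pos hc, if_pos hc, hc, pvOpt, if_pos (by omega)]
        · rw [if_neg hc, hgm c, if_neg hc, hI c, if_neg hc, sub_zero]
      · rw [if_neg (by simpa using hz), hgm]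
        by_cases hc : c = x
        · rw [if_pos hc, if_pos hc, hc, pvOpt_of_ne (by omega)]
        · rw [if_neg hc, if_neg hc, hI c, sub_zero]
    have hrec := ih _ _ hstep
    have hfun : (fun c => (f c - if c = x then 1 else 0) - (t.count c : Int))
        = (fun c => f c - ((x :: t).count c : Int)) := by
      funext c
      by_cases hc : c = x
      · subst hc
        simp [List.count_cons]
        push_cast
        ring
      · simp [List.count_cons, hc, Ne.symm hc]
    rw [hfun] at hrec
    exact hrec


theorem pvKeys_erase_sublist {κ ν : Type} [BEq κ] (d : PySem.Dict κ ν) (k : κ) :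
    (d.erase k).keys.Sublist d.keys := by
  simp only [PySem.Dict.keys, PySem.Dict.erase]
  exact List.filter_sublist.map _

theorem pvDec_nodup (l : List Char) (d : PySem.Dict Char Int) (h : d.keys.Nodup) :
    (l.foldl (fun d x =>
        let d := d.modify x 0 (· - 1)
        if d.getD x 0 == 0 then d.erase x else d) d).keys.Nodup := by
  induction l generalizing d with
  | nil => exact h
  | cons x t ih =>
    simp only [List.foldl_cons]
    apply ih
    have hm : (d.modify x 0 (· - 1)).keys.Nodup := PySem.Dict.nodup_keys_insert _ _ _ h
    split
    · exact (pvKeys_erase_sublist _ _).nodup hm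
    · exact hm

theorem pvPairFold (l : List Char) (g h : Char → Int) (a b : Int) :
    l.foldl (fun (pn : Int × Int) ch => (pn.1 + g ch, pn.2 + h ch)) (a, b)
      = (a + (l.map g).sum, b + (l.map h).sum) := by
  induction l generalizing a b with
  | nil => simp
  | cons x t ih => simp [ih, add_assoc]

theorem pvSum_sub (u v : List Char) (g : Char → Int) (hu : u.Nodup) (hv : v.Nodup)
    (hsub : ∀ c ∈ u, c ∈ v) (hz : ∀ c ∈ v, c ∉ u → g c = 0) :
    (v.map g).sum = (u.map g).sum := by
  rw [← List.sum_toFinset g hu, ← List.sum_toFinset g hv]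
  apply (Finset.sum_subset ?_ ?_).symm
  · intro c hc
    simp only [List.mem_toFinset] at *
    exact hsub c hc
  · intro c hc hnc
    simp only [List.mem_toFinset] at *
    exact hz c hc hnc

theorem pvSumCount (l : List Int) (h : ∀ v ∈ l, v = 1 ∨ v = -1) :
    (l.map (fun v => max 0 v)).sum = l.count 1 ∧
    (l.map (fun v => max 0 (-v))).sum = l.count (-1) ∧
    l.length = l.count 1 + l.count (-1) := by
  induction l with
  | nil => simp
  | cons x t ih =>
    obtain ⟨i1, i2, i3⟩ := ih (fun v hv => h v (List.mem_cons_of_mem _ hv))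
    rcases h x (List.mem_cons_self) with rfl | rfl <;>
      simp [List.count_cons, i1, i2, i3] <;> push_cast <;> omega

theorem pvMain (vals : List Int) (hnz : ∀ v ∈ vals, v ≠ 0) :
    (vals = [-1] ∨ vals = [1] ∨ vals = [] ∨ vals = [-1, 1] ∨ vals = [1, -1])
      ↔ ((vals.map (fun v => max 0 v)).sum ≤ 1 ∧ (vals.map (fun v => max 0 (-v))).sum ≤ 1) := by
  constructor
  · rintro (rfl | rfl | rfl | rfl | rfl) <;> simp
  · rintro ⟨h1, h2⟩
    have hpm : ∀ v ∈ vals, v = 1 ∨ v = -1 := by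
      intro v hv
      have hp : max 0 v ≤ (vals.map (fun v => max 0 v)).sum :=
        List.single_le_sum (by intro x hx; simp only [List.mem_map] at hx
                               obtain ⟨y, _, rfl⟩ := hx; exact le_max_left _ _) _
          (List.mem_map_of_mem hv)
      have hn : max 0 (-v) ≤ (vals.map (fun v => max 0 (-v))).sum :=
        List.single_le_sum (by intro x hx; simp only [List.mem_map] at hx
                               obtain ⟨y, _, rfl⟩ := hx; exact le_max_left _ _) _
          (List.mem_map_of_mem hv)
      have := hnz v hv
      omega
    obtain ⟨c1, c2, c3⟩ := pvSumCount vals hpm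
    rw [c1] at h1
    rw [c2] at h2
    have h1' : vals.count 1 ≤ 1 := by exact_mod_cast h1
    have h2' : vals.count (-1) ≤ 1 := by exact_mod_cast h2
    match vals, hpm, h1', h2', c3 with
    | [], _, _, _, _ => tauto
    | [a], hpm, h1', h2', _ =>
      rcases hpm a (by simp) with rfl | rfl <;> simp
    | [a, b], hpm, h1', h2', _ =>
      rcases hpm a (by simp) with rfl | rfl <;> rcases hpm b (by simp) with rfl | rfl <;>
        simp_all [List.count_cons]
    | a :: b :: c :: t, hpm, h1', h2', c3 =>
      exfalso
      simp only [List.length_cons] at c3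
      omega

theorem pvFinal' (l1 l2 : List Char) :
    (if ([[(-1 : Int)], [1], [], [-1, 1], [1, -1]] : List (List Int)).contains
        ((l2.foldl (fun d x2 =>
            let d := d.modify x2 0 (· - 1)
            if d.getD x2 0 == 0 then d.erase x2 else d)
          (l1.foldl (fun d x1 => d.modify x1 0 (· + 1))
            (PySem.Dict.empty : PySem.Dict Char Int))).values)
      then true else false)
    = (((PySem.Set.ofList (l1 ++ l2)).foldl (fun (pn : Int × Int) ch =>
          (pn.1 + max 0 ((l1.count ch : Int) - (l2.count ch : Int)),
           pn.2 + max 0 (-((l1.count ch : Int) - (l2.count ch : Int))))) ((0 : Int), (0 : Int))).1 ≤ 1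
        && ((PySem.Set.ofList (l1 ++ l2)).foldl (fun (pn : Int × Int) ch =>
          (pn.1 + max 0 ((l1.count ch : Int) - (l2.count ch : Int)),
           pn.2 + max 0 (-((l1.count ch : Int) - (l2.count ch : Int))))) ((0 : Int), (0 : Int))).2 ≤ 1) := by
  set diff : Char → Int := fun c => (l1.count c : Int) - (l2.count c : Int) with hdiff
  have h0 : pvInv PySem.Dict.empty (fun _ => (0 : Int)) := by
    intro c; simp [PySem.Dict.get?_empty, pvOpt]
  have h1 := pvInc_loop l1 PySem.Dict.empty _ h0 (fun _ => le_refl 0)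
  have h1' : pvInv (l1.foldl (fun d x => d.modify x 0 (· + 1)) PySem.Dict.empty)
      (fun c => (l1.count c : Int)) := by
    have he : (fun c => (0 : Int) + (l1.count c : Int)) = fun c => (l1.count c : Int) := by
      funext c; ring
    rwa [he] at h1
  set d1 := l1.foldl (fun d x => d.modify x 0 (· + 1)) (PySem.Dict.empty : PySem.Dict Char Int) with hd1
  set dic := l2.foldl (fun d x =>
      let d := d.modify x 0 (· - 1)
      if d.getD x 0 == 0 then d.erase x else d) d1 with hdic
  have h2 : pvInv dic diff := pvDec_loop l2 d1 _ h1'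
  have hnd1 : d1.keys.Nodup := by
    rw [hd1]
    exact PySem.Dict.nodup_keys_foldl_modify_key l1 id 0 (fun _ _ => (· + 1)) _
      PySem.Dict.nodup_keys_empty
  have hnd : dic.keys.Nodup := pvDec_nodup l2 d1 hnd1
  have hvals : dic.values = dic.keys.map diff := by
    rw [PySem.Dict.values_eq_map_keys dic hnd 0]
    exact List.map_congr_left (fun k _ => pvGetD_of_inv h2 k)
  have hmem : ∀ c, c ∈ dic.keys ↔ diff c ≠ 0 := by
    intro c
    constructor
    · intro hc hz
      have hn := (PySem.Dict.get?_eq_none_iff_not_mem_keys dic c).mp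
        (by rw [h2 c]; simp [pvOpt, hz])
      exact hn hc
    · intro hz
      by_contra hc
      have hn := (PySem.Dict.get?_eq_none_iff_not_mem_keys dic c).mpr hc
      rw [h2 c, pvOpt_of_ne hz] at hn
      simp at hn
  have hnz : ∀ v ∈ dic.values, v ≠ 0 := by
    intro v hv
    rw [hvals] at hv
    obtain ⟨c, hc, rfl⟩ := List.mem_map.mp hv
    exact (hmem c).mp hc
  rw [pvPairFold]
  simp only [zero_add]
  have hsub : ∀ c ∈ dic.keys, c ∈ PySem.Set.ofList (l1 ++ l2) := by
    intro c hc
    have hd := (hmem c).mp hc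
    rw [PySem.Set.mem_ofList, List.mem_append]
    by_contra hn
    push_neg at hn
    have e1 : l1.count c = 0 := List.count_eq_zero.mpr hn.1
    have e2 : l2.count c = 0 := List.count_eq_zero.mpr hn.2
    rw [hdiff] at hd
    simp [e1, e2] at hd
  have hz0 : ∀ c ∈ PySem.Set.ofList (l1 ++ l2), c ∉ dic.keys → diff c = 0 := by
    intro c _ hnc
    by_contra hz
    exact hnc ((hmem c).mpr hz)
  have hsum1 : ((PySem.Set.ofList (l1 ++ l2)).map (fun ch => max 0 (diff ch))).sum
      = ((dic.values).map (fun v => max 0 v)).sum := by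
    rw [hvals, List.map_map]
    exact pvSum_sub dic.keys _ _ hnd (PySem.Set.nodup_ofList _) hsub
      (fun c hc hnc => by simp [hz0 c hc hnc])
  have hsum2 : ((PySem.Set.ofList (l1 ++ l2)).map (fun ch => max 0 (-diff ch))).sum
      = ((dic.values).map (fun v => max 0 (-v))).sum := by
    rw [hvals, List.map_map]
    exact pvSum_sub dic.keys _ _ hnd (PySem.Set.nodup_ofList _) hsub
      (fun c hc hnc => by simp [hz0 c hc hnc])
  rw [hsum1, hsum2]
  have hiff := pvMain dic.values hnz
  by_cases hcont : ([[(-1 : Int)], [1], [], [-1, 1], [1, -1]] : List (List Int)).contains dic.values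
  · rw [if_pos hcont]
    have hm := List.contains_iff_mem.mp hcont
    simp only [List.mem_cons, List.mem_singleton, List.not_mem_nil, or_false] at hm
    obtain ⟨hA, hB⟩ := hiff.mp (by tauto)
    simp [hA, hB]
  · rw [if_neg hcont]
    have hnb : ¬ (((dic.values).map (fun v => max 0 v)).sum ≤ 1 ∧ ((dic.values).map (fun v => max 0 (-v))).sum ≤ 1) := by
      intro hb
      have hm := hiff.mpr hb
      apply hcont
      rw [List.contains_iff_mem]
      rcases hm with h | h | h | h | h <;> simp [h]
    rcases not_and_or.mp hnb with h | h <;> simp [h]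


-- ===== VERDICT (by name: the statement is the Claim_ definition above) =====
theorem isPeudoAnagram_spec : Claim_equal_isPeudoAnagram := by
  intro s1 s2 _
  show isPeudoAnagram s1 s2 = isPeudoAnagram_alt s1 s2
  exact pvFinal' s1.toList s2.toList
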